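-- pv_equiv track=rewrite | github.com/Bzhdha/rgaaWebChecker | modules/titles_analyzer.py | _compute_ai_coverage_9_1_2
-- ===== SOURCE A (Python) =====
-- def _compute_ai_coverage_9_1_2(sections_9_1_2):
--     total = len(sections_9_1_2)
--     with_screenshot = sum(1 for row in sections_9_1_2 if row.get("section_screenshot_path"))
--     providers = [row.get("ai_provider", "") for row in sections_9_1_2]
--     api_count = sum(1 for p in providers if p == "api")
--     fallback_count = sum(1 for p in providers if p in {"api_error", "missing_api_key"})
--     pending_count = sum(1 for row in sections_9_1_2 if row.get("ai_ok", "") == "")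
--     return {
--         "total_sections": total,
--         "with_screenshot": with_screenshot,
--         "api_count": api_count,
--         "fallback_count": fallback_count,
--         "pending_count": pending_count,
--     }
-- ===== SOURCE B (Python) =====
-- def _compute_ai_coverage_9_1_2(sections_9_1_2):
--     total = with_screenshot = api_count = fallback_count = pending_count = 0
--     for row in sections_9_1_2:
--         total += 1
--         if row.get("section_screenshot_path"):
--             with_screenshot += 1
--         provider = row.get("ai_provider", "")
--         if provider == "api":
--             api_count += 1
--         elif provider in ("api_error", "missing_api_key"):
--             fallback_count += 1
--         if row.get("ai_ok", "") == "":
--             pending_count += 1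
--     return {
--         "total_sections": total,
--         "with_screenshot": with_screenshot,
--         "api_count": api_count,
--         "fallback_count": fallback_count,
--         "pending_count": pending_count,
--     }
-- ===== Notes on version B (the rewrite author's own statement) =====
-- stated objective: alternative
-- what changed: Replaces A's five separate scans (len, three generator sums, and an intermediate providers list) by a single loop maintaining five integer accumulators, reading each row once.
import Mathlib
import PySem

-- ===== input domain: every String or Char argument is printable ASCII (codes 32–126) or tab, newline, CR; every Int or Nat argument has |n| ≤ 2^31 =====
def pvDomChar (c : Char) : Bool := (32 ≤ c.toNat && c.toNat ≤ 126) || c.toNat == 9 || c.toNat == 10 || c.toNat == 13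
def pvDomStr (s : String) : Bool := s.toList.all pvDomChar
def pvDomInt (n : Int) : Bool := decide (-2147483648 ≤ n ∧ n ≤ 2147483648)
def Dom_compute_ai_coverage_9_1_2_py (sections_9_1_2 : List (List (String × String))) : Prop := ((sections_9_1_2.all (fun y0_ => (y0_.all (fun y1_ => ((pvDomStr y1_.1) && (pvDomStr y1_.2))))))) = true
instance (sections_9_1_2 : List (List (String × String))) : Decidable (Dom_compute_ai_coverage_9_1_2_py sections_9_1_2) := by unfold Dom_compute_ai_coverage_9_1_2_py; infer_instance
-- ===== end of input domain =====

-- B replaces A's five separate scans over the rows by one loop carrying five integer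
-- accumulators (objective: alternative single-pass decomposition; same asymptotic cost).

-- row.get(k, dflt): first-match lookup in the association list
def pvRowGetD (row : List (String × String)) (k dflt : String) : String :=
  match row.lookup k with
  | some v => v
  | none => dflt

-- truthiness of row.get("section_screenshot_path") (default None): present and non-empty
def pvScreenshotTruthy (row : List (String × String)) : Bool :=
  match row.lookup "section_screenshot_path" with
  | some v => v != ""
  | none => false

-- ===== PORT A =====
def compute_ai_coverage_9_1_2_py (sections_9_1_2 : List (List (String × String))) : List (String × Int) :=
  let total : Int := sections_9_1_2.length
  let with_screenshot : Int := sections_9_1_2.countP (fun row => pvScreenshotTruthy row)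
  let providers : List String := sections_9_1_2.map (fun row => pvRowGetD row "ai_provider" "")
  let api_count : Int := providers.countP (fun p => p == "api")
  let fallback_count : Int := providers.countP (fun p => p == "api_error" || p == "missing_api_key")
  let pending_count : Int := sections_9_1_2.countP (fun row => pvRowGetD row "ai_ok" "" == "")
  [("total_sections", total), ("with_screenshot", with_screenshot),
   ("api_count", api_count), ("fallback_count", fallback_count),
   ("pending_count", pending_count)]

-- ===== PORT B =====
-- one loop step over a row, updating the five accumulators
def pvAltStep (acc : Int × Int × Int × Int × Int) (row : List (String × String)) :
    Int × Int × Int × Int × Int :=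
  let (total, ws, api, fb, pend) := acc
  let ws := if pvScreenshotTruthy row then ws + 1 else ws
  let provider := pvRowGetD row "ai_provider" ""
  let api' := if provider == "api" then api + 1 else api
  let fb' := if provider == "api" then fb
             else if provider == "api_error" || provider == "missing_api_key" then fb + 1 else fb
  let pend := if pvRowGetD row "ai_ok" "" == "" then pend + 1 else pend
  (total + 1, ws, api', fb', pend)

def compute_ai_coverage_9_1_2_py_alt (sections_9_1_2 : List (List (String × String))) : List (String × Int) :=
  let (total, ws, api, fb, pend) := sections_9_1_2.foldl pvAltStep (0, 0, 0, 0, 0)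
  [("total_sections", total), ("with_screenshot", ws),
   ("api_count", api), ("fallback_count", fb),
   ("pending_count", pend)]

-- ===== PRECONDITION & SPEC =====
def Spec_compute_ai_coverage_9_1_2_py (sections_9_1_2 : List (List (String × String))) (out : List (String × Int)) : Prop := out = compute_ai_coverage_9_1_2_py_alt sections_9_1_2
instance (sections_9_1_2 : List (List (String × String))) (out : List (String × Int)) : Decidable (Spec_compute_ai_coverage_9_1_2_py sections_9_1_2 out) := by unfold Spec_compute_ai_coverage_9_1_2_py; infer_instance

-- ===== CLAIM (what is proved, stated in full; the proofs are below) =====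
def Claim_equal_compute_ai_coverage_9_1_2_py : Prop := ∀ (sections_9_1_2 : List (List (String × String))), Dom_compute_ai_coverage_9_1_2_py sections_9_1_2 → Spec_compute_ai_coverage_9_1_2_py sections_9_1_2 (compute_ai_coverage_9_1_2_py sections_9_1_2)

-- ===== LEMMAS AND PROOFS =====

-- loop invariant: the fold from an arbitrary accumulator adds A's five counts
theorem pv_foldl_altStep (s : List (List (String × String)))
    (t w a f p : Int) :
    s.foldl pvAltStep (t, w, a, f, p) =
      (t + s.length,
       w + s.countP (fun row => pvScreenshotTruthy row),
       a + s.countP (fun row => pvRowGetD row "ai_provider" "" == "api"),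
       f + s.countP (fun row =>
             !(pvRowGetD row "ai_provider" "" == "api") &&
             (pvRowGetD row "ai_provider" "" == "api_error" ||
              pvRowGetD row "ai_provider" "" == "missing_api_key")),
       p + s.countP (fun row => pvRowGetD row "ai_ok" "" == "")) := by
  induction s generalizing t w a f p with
  | nil => simp
  | cons row rest ih =>
    simp only [List.foldl_cons, pvAltStep, List.countP_cons, List.length_cons]
    rw [ih]
    split_ifs <;> simp_all [Prod.mk.injEq] <;> omega

theorem compute_ai_coverage_9_1_2_py_spec' (s : List (List (String × String))) :
    compute_ai_coverage_9_1_2_py s = compute_ai_coverage_9_1_2_py_alt s := by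
  unfold compute_ai_coverage_9_1_2_py compute_ai_coverage_9_1_2_py_alt
  rw [pv_foldl_altStep]
  simp only [List.countP_map, Function.comp_def, zero_add]
  have hfb : s.countP (fun row =>
        !(pvRowGetD row "ai_provider" "" == "api") &&
        (pvRowGetD row "ai_provider" "" == "api_error" ||
         pvRowGetD row "ai_provider" "" == "missing_api_key")) =
      s.countP (fun row =>
        pvRowGetD row "ai_provider" "" == "api_error" ||
        pvRowGetD row "ai_provider" "" == "missing_api_key") := by
    apply List.countP_congr
    intro row _
    by_cases h : pvRowGetD row "ai_provider" "" = "api" <;> simp [h]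
  rw [hfb]

-- ===== VERDICT (by name: the statement is the Claim_ definition above) =====
theorem compute_ai_coverage_9_1_2_py_spec : Claim_equal_compute_ai_coverage_9_1_2_py := by
  intro s _
  unfold Spec_compute_ai_coverage_9_1_2_py
  exact compute_ai_coverage_9_1_2_py_spec' s
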